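-- pv_equiv track=rewrite | github.com/ltian059/mmWave-Radar-for-Health-Monitoring-Project | testModel1/GUIDEV_6843_WITH_GUI_HVRAE_ppl_counting_modified_11.1.py | find_tpfpfn
-- ===== SOURCE A (Python) =====
-- def find_tpfpfn(detected_falls_idx, gt_falls_idx):
--     n_detected_falls    = len(detected_falls_idx)
--     falls_tp            = []
--     falls_fp            = []
--     falls_fn            = list(gt_falls_idx)
--     win_len             = 20
--     for i in range(n_detected_falls):
--         n_gt_falls      = len(falls_fn)
--         j               = 0
--         while j < n_gt_falls:
--             # Find a gt fall index whose window covers the detected fall index, so it's true positive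
--             if int(falls_fn[j]-win_len/2) <= detected_falls_idx[i] <= int(falls_fn[j]+win_len/2):
--                 # Remove the true positive from the gt_falls_idx list, finally only false negative remains
--                 falls_fn.pop(j)
--                 falls_tp.append(i)
--                 break
--             j += 1
--         # Dn not find a gt fall index whose window covers the detected fall index, so it's false positive
--         if j == n_gt_falls:
--             falls_fp.append(i)
--
--     return falls_tp, falls_fp, falls_fn
-- ===== SOURCE B (Python) =====
-- def find_tpfpfn(detected_falls_idx, gt_falls_idx):
--     # Index the ground-truth fall indices by value: value -> ascending list of
--     # original positions still unmatched.  Each detected fall then probes only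
--     # the 21 values of its +/-10 window instead of scanning the whole gt list.
--     pos_by_val = {}
--     for k, g in enumerate(gt_falls_idx):
--         pos_by_val.setdefault(g, []).append(k)
--     removed = [False] * len(gt_falls_idx)
--     falls_tp = []
--     falls_fp = []
--     for i, d in enumerate(detected_falls_idx):
--         best_pos = None
--         best_val = None
--         for v in range(d - 10, d + 11):
--             lst = pos_by_val.get(v)
--             if lst and (best_pos is None or lst[0] < best_pos):
--                 best_pos = lst[0]
--                 best_val = v
--         if best_pos is None:
--             falls_fp.append(i)
--         else:
--             falls_tp.append(i)
--             pos_by_val[best_val].pop(0)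
--             removed[best_pos] = True
--     falls_fn = [g for k, g in enumerate(gt_falls_idx) if not removed[k]]
--     return falls_tp, falls_fp, falls_fn
-- ===== Notes on version B (the rewrite author's own statement) =====
-- stated objective: faster
-- what changed: Instead of rescanning the shrinking ground-truth list for every detected fall, B indexes gt positions by value in a dict once, probes only the 21 values of the fixed +/-10 window per detected fall (taking the minimum surviving original position, which equals A's first-match-in-order), and builds the false-negative list once at the end from removal flags.
import Mathlib
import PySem

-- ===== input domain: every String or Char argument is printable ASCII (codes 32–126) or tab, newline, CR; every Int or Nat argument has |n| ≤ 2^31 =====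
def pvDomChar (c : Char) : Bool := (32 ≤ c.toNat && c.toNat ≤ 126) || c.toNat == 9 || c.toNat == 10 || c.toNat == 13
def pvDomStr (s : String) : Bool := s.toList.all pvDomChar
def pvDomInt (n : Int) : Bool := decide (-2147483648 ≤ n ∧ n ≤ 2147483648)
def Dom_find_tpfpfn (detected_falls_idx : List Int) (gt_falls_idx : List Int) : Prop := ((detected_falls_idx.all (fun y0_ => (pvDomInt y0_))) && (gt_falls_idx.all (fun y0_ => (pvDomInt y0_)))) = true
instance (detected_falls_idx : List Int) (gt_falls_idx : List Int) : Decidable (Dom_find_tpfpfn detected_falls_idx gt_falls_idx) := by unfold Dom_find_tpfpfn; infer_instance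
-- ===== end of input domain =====

-- B replaces A's per-detected rescan of the shrinking gt list by a value-indexed dict probed
-- on the fixed ±10 window (objective: faster; measured faster in a timing run).

-- ===== PORT A =====
-- Python's window test is int(g - 20/2) <= d <= int(g + 20/2); for |g| ≤ 2^31 the float
-- arithmetic is exact, so it is exactly g - 10 ≤ d ∧ d ≤ g + 10.
def pvHit (d g : Int) : Bool := decide (g - 10 ≤ d) && decide (d ≤ g + 10)

-- A's inner `while j < n_gt` scan with `falls_fn.pop(j)` on the first hit:
-- `pre` is the already-scanned prefix (indices < j); returns (matched?, resulting falls_fn).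
def pvLoopA (d : Int) (pre : List Int) : List Int → Bool × List Int
  | [] => (false, pre)
  | g :: rest => if pvHit d g then (true, pre ++ rest) else pvLoopA d (pre ++ [g]) rest

def find_tpfpfn (detected_falls_idx : List Int) (gt_falls_idx : List Int) :
    List Int × List Int × List Int :=
  (PySem.List.enumerate detected_falls_idx).foldl
    (fun (st : List Int × List Int × List Int) p =>
      let r := pvLoopA p.2 [] st.2.2
      if r.1 then (st.1 ++ [p.1], st.2.1, r.2)        -- break with a hit: pop + tp.append(i)
      else (st.1, st.2.1 ++ [p.1], st.2.2))            -- j == n_gt: fp.append(i)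
    ([], [], gt_falls_idx)

-- ===== PORT B =====
-- pos_by_val: value -> ascending list of original positions still unmatched
-- (built with setdefault(g, []).append(k), i.e. d[g] = d.get(g, []) + [k]).
def pvBuild (gt_falls_idx : List Int) : PySem.Dict Int (List Int) :=
  (PySem.List.enumerate gt_falls_idx).foldl
    (fun d p => d.modify p.2 [] (fun l => l ++ [p.1])) PySem.Dict.empty

-- the `for v in range(d - 10, d + 11)` probe loop: (best_pos, best_val) as an Option pair
def pvBest (dict : PySem.Dict Int (List Int)) (d : Int) : Option (Int × Int) :=
  (PySem.List.pyRange (d - 10) (d + 11) 1).foldl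
    (fun best v =>
      match dict.getD v [] with        -- pos_by_val.get(v): missing key and [] both fail `if lst`
      | [] => best
      | k :: _ =>
        match best with
        | none => some (k, v)
        | some (bk, bv) => if k < bk then some (k, v) else some (bk, bv))
    none

def find_tpfpfn_alt (detected_falls_idx : List Int) (gt_falls_idx : List Int) :
    List Int × List Int × List Int :=
  let st := (PySem.List.enumerate detected_falls_idx).foldl
    (fun (st : List Int × List Int × PySem.Dict Int (List Int) × List Bool) p =>
      match pvBest st.2.2.1 p.2 with
      | none => (st.1, st.2.1 ++ [p.1], st.2.2.1, st.2.2.2)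
      | some (k, v) =>
        (st.1 ++ [p.1], st.2.1,
         st.2.2.1.modify v [] (fun l => l.drop 1),     -- pos_by_val[best_val].pop(0); list nonempty here
         PySem.List.pySetD st.2.2.2 k true))           -- removed[best_pos] = True; k in range here
    ([], [], pvBuild gt_falls_idx, List.replicate gt_falls_idx.length false)
  (st.1, st.2.1,
   -- falls_fn = [g for k, g in enumerate(gt_falls_idx) if not removed[k]]
   (PySem.List.enumerate gt_falls_idx).foldl
     (fun acc p => if PySem.List.pyGetD st.2.2.2 p.1 false then acc else acc ++ [p.2]) [])

-- ===== PRECONDITION & SPEC =====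
def Spec_find_tpfpfn (detected_falls_idx : List Int) (gt_falls_idx : List Int) (out : List Int × List Int × List Int) : Prop := out = find_tpfpfn_alt detected_falls_idx gt_falls_idx
instance (detected_falls_idx : List Int) (gt_falls_idx : List Int) (out : List Int × List Int × List Int) : Decidable (Spec_find_tpfpfn detected_falls_idx gt_falls_idx out) := by unfold Spec_find_tpfpfn; infer_instance

-- ===== CLAIM (what is proved, stated in full; the proofs are below) =====
def Claim_equal_find_tpfpfn : Prop := ∀ (detected_falls_idx : List Int) (gt_falls_idx : List Int), Dom_find_tpfpfn detected_falls_idx gt_falls_idx → Spec_find_tpfpfn detected_falls_idx gt_falls_idx (find_tpfpfn detected_falls_idx gt_falls_idx)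

-- ===== LEMMAS AND PROOFS =====

-- the unmatched gt values in original order, from the removal flags
def pvSel : List Int → List Bool → List Int
  | [], _ => []
  | _ :: _, [] => []
  | g :: gs, r :: rs => if r then pvSel gs rs else g :: pvSel gs rs

-- ascending list of unmatched positions holding value v (relative positions)
def pvPoss (v : Int) : List Int → List Bool → List Nat
  | [], _ => []
  | _ :: _, [] => []
  | g :: gs, r :: rs =>
      (if !r && (g == v) then [0] else []) ++ (pvPoss v gs rs).map (· + 1)

-- first unmatched position whose value's window covers d, with that value
def pvFirstHit (d : Int) : List Int → List Bool → Option (Nat × Int)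
  | [], _ => none
  | _ :: _, [] => none
  | g :: gs, r :: rs =>
      if !r && pvHit d g then some (0, g)
      else (pvFirstHit d gs rs).map (fun p => (p.1 + 1, p.2))

-- left-biased min-by-position on optional (pos, val) candidates
def pvCombine (b c : Option (Int × Int)) : Option (Int × Int) :=
  match c with
  | none => b
  | some (k, v) =>
    match b with
    | none => some (k, v)
    | some (bk, bv) => if k < bk then some (k, v) else some (bk, bv)

def pvCand (dict : PySem.Dict Int (List Int)) (v : Int) : Option (Int × Int) :=
  match dict.getD v [] with
  | [] => none
  | k :: _ => some (k, v)

-- dict state as a function of the removal flags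
def pvDictInv (gt : List Int) (rem : List Bool) (dict : PySem.Dict Int (List Int)) : Prop :=
  ∀ v, dict.getD v [] = (pvPoss v gt rem).map (fun (j : Nat) => (j : Int))

lemma pvSel_replicate (gt : List Int) : pvSel gt (List.replicate gt.length false) = gt := by
  induction gt with
  | nil => rfl
  | cons g gs ih => simp [pvSel, List.replicate, ih]

lemma pvLoopA_sel (d : Int) : ∀ (gt : List Int) (rem : List Bool) (pre : List Int),
    rem.length = gt.length →
    pvLoopA d pre (pvSel gt rem) =
      match pvFirstHit d gt rem with
      | none => (false, pre ++ pvSel gt rem)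
      | some (j, _) => (true, pre ++ pvSel gt (rem.set j true)) := by
  intro gt
  induction gt with
  | nil =>
    intro rem pre h
    simp only [List.length_nil, List.length_eq_zero_iff] at h
    subst h
    simp [pvSel, pvFirstHit, pvLoopA]
  | cons g gs ih =>
    intro rem pre h
    cases rem with
    | nil => simp at h
    | cons r rs =>
      simp only [List.length_cons, Nat.add_right_cancel_iff] at h
      cases r with
      | true =>
        simp only [pvSel, pvFirstHit, if_true, Bool.not_true, Bool.false_and,
          Bool.false_eq_true, if_false]
        rw [ih rs pre h]
        cases hfh : pvFirstHit d gs rs with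
        | none => simp
        | some p => simp [pvSel]
      | false =>
        simp only [pvSel, pvFirstHit, Bool.false_eq_true, if_false, Bool.not_false, Bool.true_and]
        by_cases hh : pvHit d g = true
        · simp [pvLoopA, hh, pvSel]
        · simp only [pvLoopA, hh, if_false, Bool.false_eq_true]
          rw [ih rs (pre ++ [g]) h]
          cases hfh : pvFirstHit d gs rs with
          | none => simp
          | some p => simp [pvSel]

lemma pvShift (s : Int) (l : List Nat) :
    List.map (fun j : Nat => s + (j : Int)) (l.map (· + 1)) =
      List.map (fun j : Nat => (s + 1) + (j : Int)) l := by
  rw [List.map_map]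
  apply List.map_congr_left
  intro j _
  simp only [Function.comp_apply]
  push_cast
  ring


lemma pvBuild_aux (v : Int) : ∀ (gs : List Int) (s : Int) (d0 : PySem.Dict Int (List Int)),
    (((PySem.List.enumerate gs s).foldl
        (fun d p => d.modify p.2 [] (fun l => l ++ [p.1])) d0).getD v []) =
      d0.getD v [] ++ (pvPoss v gs (List.replicate gs.length false)).map (fun (j : Nat) => s + (j : Int)) := by
  intro gs
  induction gs with
  | nil => intro s d0; simp [PySem.List.enumerate, pvPoss]
  | cons g gs ih =>
    intro s d0
    rw [PySem.List.enumerate_cons, List.foldl_cons, ih (s + 1)]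
    simp only [List.length_cons, List.replicate_succ, pvPoss, List.map_append]
    rw [pvShift s, PySem.Dict.getD_modify]
    by_cases hv : v = g
    · subst hv
      simp [List.append_assoc]
    · rw [if_neg hv]
      have : (g == v) = false := by simpa using fun h => hv h.symm
      simp [this]
lemma pvBuild_inv (gt : List Int) :
    pvDictInv gt (List.replicate gt.length false) (pvBuild gt) := by
  intro v
  rw [pvBuild, pvBuild_aux v gt 0 PySem.Dict.empty]
  simp

lemma pvPoss_none (d : Int) : ∀ (gt : List Int) (rem : List Bool),
    pvFirstHit d gt rem = none →
    ∀ v, pvHit d v = true → pvPoss v gt rem = [] := by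
  intro gt
  induction gt with
  | nil => intro rem _ v _; cases rem <;> rfl
  | cons g gs ih =>
    intro rem h v hv
    cases rem with
    | nil => rfl
    | cons r rs =>
      rw [pvFirstHit] at h
      by_cases hc : (!r && pvHit d g) = true
      · simp [hc] at h
      · rw [if_neg hc, Option.map_eq_none_iff] at h
        rw [pvPoss, ih rs h v hv]
        have : (!r && (g == v)) = false := by
          by_cases hg : g = v
          · subst hg; simpa [hv] using hc
          · simp [hg]
        simp [this]

lemma pvFirstHit_spec (d : Int) : ∀ (gt : List Int) (rem : List Bool) (j : Nat) (g : Int),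
    pvFirstHit d gt rem = some (j, g) →
    pvHit d g = true ∧ (pvPoss g gt rem).head? = some j ∧
      ∀ v k, pvHit d v = true → (pvPoss v gt rem).head? = some k →
        j ≤ k ∧ (k = j → v = g) := by
  intro gt
  induction gt with
  | nil => intro rem j g h; cases rem <;> simp [pvFirstHit] at h
  | cons g' gs ih =>
    intro rem j g h
    cases rem with
    | nil => simp [pvFirstHit] at h
    | cons r rs =>
      rw [pvFirstHit] at h
      by_cases hc : (!r && pvHit d g') = true
      · rw [if_pos hc] at h
        simp only [Option.some.injEq, Prod.mk.injEq] at h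
        obtain ⟨hj, hg⟩ := h
        subst hj; subst hg
        obtain ⟨hr, hh⟩ : (!r) = true ∧ pvHit d g' = true := by simpa using hc
        refine ⟨hh, ?_, ?_⟩
        · simp [pvPoss, hr]
        · intro v k hv hk
          rw [pvPoss] at hk
          by_cases hgv : (g' == v) = true
          · have hveq : g' = v := by simpa using hgv
            rw [if_pos (by simp [hr, hgv])] at hk
            simp only [List.singleton_append, List.head?_cons, Option.some.injEq] at hk
            exact ⟨by omega, fun _ => hveq.symm⟩
          · rw [if_neg (by simp [hgv])] at hk
            simp only [List.nil_append, List.head?_map] at hk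
            obtain ⟨k', _, hk'⟩ := Option.map_eq_some_iff.mp hk
            exact ⟨by omega, fun h0 => by omega⟩
      · rw [if_neg hc] at h
        obtain ⟨⟨j', g₀⟩, hrec, heq⟩ := Option.map_eq_some_iff.mp h
        simp only [Prod.mk.injEq] at heq
        obtain ⟨hj, hg⟩ := heq
        subst hj; subst hg
        obtain ⟨h1, h2, h3⟩ := ih rs j' g₀ hrec
        have hpref : ∀ v, pvHit d v = true → (!r && (g' == v)) = false := by
          intro v hv
          by_cases hgv : (g' == v) = true
          · have hveq : g' = v := by simpa using hgv
            subst hveq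
            simp only [hv, Bool.and_true] at hc
            have hrt : r = true := by simpa using hc
            simp [hrt]
          · simp [hgv]
        refine ⟨h1, ?_, ?_⟩
        · rw [pvPoss, hpref g₀ h1]
          simp [List.head?_map, h2]
        · intro v k hv hk
          rw [pvPoss, hpref v hv] at hk
          simp only [Bool.false_eq_true, if_false, List.nil_append, List.head?_map] at hk
          obtain ⟨k', hk', hkk⟩ := Option.map_eq_some_iff.mp hk
          obtain ⟨hle, htie⟩ := h3 v k' hv hk'
          exact ⟨by omega, fun h0 => htie (by omega)⟩

lemma pvPoss_set (d : Int) : ∀ (gt : List Int) (rem : List Bool) (j : Nat) (g : Int),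
    pvFirstHit d gt rem = some (j, g) →
    ∀ v, pvPoss v gt (rem.set j true) =
      if v = g then (pvPoss v gt rem).tail else pvPoss v gt rem := by
  intro gt
  induction gt with
  | nil => intro rem j g h; cases rem <;> simp [pvFirstHit] at h
  | cons g' gs ih =>
    intro rem j g h
    cases rem with
    | nil => simp [pvFirstHit] at h
    | cons r rs =>
      rw [pvFirstHit] at h
      by_cases hc : (!r && pvHit d g') = true
      · rw [if_pos hc] at h
        simp only [Option.some.injEq, Prod.mk.injEq] at h
        obtain ⟨hj, hg⟩ := h
        subst hj; subst hg
        obtain ⟨hr, _⟩ : (!r) = true ∧ pvHit d g' = true := by simpa using hc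
        intro v
        by_cases hgv : (g' == v) = true
        · have hveq : g' = v := by simpa using hgv
          simp [List.set_cons_zero, pvPoss, hr, hgv, if_pos hveq.symm]
        · have : ¬ v = g' := fun hvg => hgv (by simp [hvg])
          simp [List.set_cons_zero, pvPoss, hgv, this]
      · rw [if_neg hc] at h
        obtain ⟨⟨j', g₀⟩, hrec, heq⟩ := Option.map_eq_some_iff.mp h
        simp only [Prod.mk.injEq] at heq
        obtain ⟨hj, hg⟩ := heq
        subst hj; subst hg
        have h1 : pvHit d g₀ = true := (pvFirstHit_spec d gs rs j' g₀ hrec).1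
        have hpref : (!r && (g' == g₀)) = false := by
          by_cases hgv : (g' == g₀) = true
          · have hveq : g' = g₀ := by simpa using hgv
            rw [hveq] at hc ⊢
            simp only [h1, Bool.and_true] at hc
            have hrt : r = true := by simpa using hc
            simp [hrt]
          · simp [hgv]
        intro v
        rw [List.set_cons_succ, pvPoss, pvPoss, ih rs j' g₀ hrec v]
        by_cases hv : v = g₀
        · subst hv
          rw [if_pos rfl, if_pos rfl, hpref]
          simp [List.map_tail]
        · rw [if_neg hv, if_neg hv]

lemma pvCombine_cases (b c : Option (Int × Int)) : pvCombine b c = b ∨ pvCombine b c = c := by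
  rcases c with _ | ⟨k, v⟩
  · left; rfl
  · rcases b with _ | ⟨bk, bv⟩
    · right; rfl
    · by_cases h : k < bk
      · right; simp [pvCombine, h]
      · left; simp [pvCombine, h]

lemma pvFoldStep (dict : PySem.Dict Int (List Int)) :
    ∀ (l : List Int) (b : Option (Int × Int)),
    l.foldl (fun best v =>
      match dict.getD v [] with
      | [] => best
      | k :: _ =>
        match best with
        | none => some (k, v)
        | some (bk, bv) => if k < bk then some (k, v) else some (bk, bv)) b =
    (l.map (pvCand dict)).foldl pvCombine b := by
  intro l
  induction l with
  | nil => intro b; rfl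
  | cons v t ih =>
    intro b
    rw [List.foldl_cons, List.map_cons, List.foldl_cons, ih]
    congr 1
    cases h : dict.getD v [] with
    | nil => simp [pvCand, pvCombine, h]
    | cons k ks => cases b <;> simp [pvCand, pvCombine, h]

lemma pvFoldCombine_none : ∀ (l : List (Option (Int × Int))) (b : Option (Int × Int)),
    (∀ x ∈ l, x = none) → l.foldl pvCombine b = b := by
  intro l
  induction l with
  | nil => intro b _; rfl
  | cons h t ih =>
    intro b hn
    rw [List.foldl_cons, hn h List.mem_cons_self]
    exact ih b (fun x hx => hn x (List.mem_cons_of_mem _ hx))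

lemma pvFoldCombine_min (c : Int × Int) :
    ∀ (l : List (Option (Int × Int))) (b0 : Option (Int × Int)),
    (some c ∈ l ∨ b0 = some c) →
    (∀ p, some p ∈ l ∨ b0 = some p → c.1 ≤ p.1 ∧ (p.1 = c.1 → p = c)) →
    l.foldl pvCombine b0 = some c := by
  intro l
  induction l with
  | nil =>
    intro b0 hm _
    rcases hm with h | h
    · simp at h
    · simpa using h
  | cons h t ih =>
    intro b0 hm hmin
    rw [List.foldl_cons]
    have hmem' : ∀ p, some p ∈ t ∨ pvCombine b0 h = some p → c.1 ≤ p.1 ∧ (p.1 = c.1 → p = c) := by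
      intro p hp
      rcases hp with hp | hp
      · exact hmin p (Or.inl (List.mem_cons_of_mem _ hp))
      · rcases pvCombine_cases b0 h with he | he
        · exact hmin p (Or.inr (he ▸ hp))
        · apply hmin p
          left
          rw [← hp, he]
          exact List.mem_cons_self
    apply ih (pvCombine b0 h) _ hmem'
    rcases hm with hm | hm
    · rcases List.mem_cons.mp hm with hh | ht
      · -- h = some c
        right
        rcases b0 with _ | ⟨bk, bv⟩
        · rw [← hh]; rfl
        · obtain ⟨hle, htie⟩ := hmin (bk, bv) (Or.inr rfl)
          rw [← hh]
          simp only [pvCombine]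
          by_cases hlt : c.1 < bk
          · simp [hlt]
          · have : bk = c.1 := le_antisymm (by omega) (by simpa using hle)
            have := htie this
            simp [hlt, this]
      · exact Or.inl ht
    · -- b0 = some c
      right
      subst hm
      rcases h with _ | ⟨k, v⟩
      · rfl
      · obtain ⟨hle, htie⟩ := hmin (k, v) (Or.inl List.mem_cons_self)
        simp only [pvCombine]
        have : ¬ k < c.1 := by omega
        simp [this]

lemma pvBest_eq (gt : List Int) (rem : List Bool) (dict : PySem.Dict Int (List Int))
    (hd : pvDictInv gt rem dict) (d : Int) :
    pvBest dict d = (pvFirstHit d gt rem).map (fun p => ((p.1 : Int), p.2)) := by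
  rw [pvBest, pvFoldStep]
  cases hfh : pvFirstHit d gt rem with
  | none =>
    simp only [Option.map_none]
    apply pvFoldCombine_none
    intro x hx
    obtain ⟨v, hv, hcand⟩ := List.mem_map.mp hx
    have hvr := (PySem.List.mem_pyRange_one).mp hv
    have hhit : pvHit d v = true := by simp only [pvHit]; simp; omega
    rw [← hcand, pvCand, hd v, pvPoss_none d gt rem hfh v hhit]
    rfl
  | some p =>
    obtain ⟨j, g⟩ := p
    obtain ⟨h1, h2, h3⟩ := pvFirstHit_spec d gt rem j g hfh
    simp only [Option.map_some]
    have h1' : g - 10 ≤ d ∧ d ≤ g + 10 := by simpa [pvHit] using h1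
    apply pvFoldCombine_min ((j : Int), g)
    · left
      apply List.mem_map.mpr
      refine ⟨g, (PySem.List.mem_pyRange_one).mpr (by omega), ?_⟩
      rw [pvCand, hd g]
      cases hp : pvPoss g gt rem with
      | nil => rw [hp] at h2; simp at h2
      | cons a t =>
        rw [hp] at h2
        simp only [List.head?_cons, Option.some.injEq] at h2
        subst h2
        rfl
    · intro p hp
      rcases hp with hp | hp
      · obtain ⟨v, hv, hcand⟩ := List.mem_map.mp hp
        have hvr := (PySem.List.mem_pyRange_one).mp hv
        have hhit : pvHit d v = true := by simp only [pvHit]; simp; omega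
        rw [pvCand, hd v] at hcand
        cases hpv : pvPoss v gt rem with
        | nil => rw [hpv] at hcand; simp at hcand
        | cons k' t =>
          rw [hpv] at hcand
          simp only [List.map_cons] at hcand
          have hpeq : p = ((k' : Int), v) := by
            simpa using hcand.symm
          obtain ⟨hle, htie⟩ := h3 v k' hhit (by rw [hpv]; rfl)
          subst hpeq
          constructor
          · show (j : Int) ≤ (k' : Int)
            exact_mod_cast hle
          · intro heq
            have heq' : (k' : Int) = (j : Int) := heq
            have hkj : k' = j := by exact_mod_cast heq'
            have := htie hkj
            simp [this, hkj]
      · simp at hp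

lemma pvFinal_aux : ∀ (gs : List Int) (rs pre : List Bool) (acc : List Int),
    rs.length = gs.length →
    (PySem.List.enumerate gs ((pre.length : Nat) : Int)).foldl
      (fun acc p => if PySem.List.pyGetD (pre ++ rs) p.1 false then acc else acc ++ [p.2]) acc
    = acc ++ pvSel gs rs := by
  intro gs
  induction gs with
  | nil =>
    intro rs pre acc h
    simp only [List.length_nil, List.length_eq_zero_iff] at h
    subst h
    simp [PySem.List.enumerate, pvSel]
  | cons g gs ih =>
    intro rs pre acc h
    cases rs with
    | nil => simp at h
    | cons r rs' =>
      simp only [List.length_cons, Nat.add_right_cancel_iff] at h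
      rw [PySem.List.enumerate_cons, List.foldl_cons]
      have hget : PySem.List.pyGetD (pre ++ r :: rs') ((pre.length : Nat) : Int) false = r := by
        rw [PySem.List.pyGetD_natCast]
        rw [List.getD_eq_getElem?_getD, List.getElem?_append_right (le_refl _)]
        simp
      have hlen : ((pre.length : Nat) : Int) + 1 = (((pre ++ [r]).length : Nat) : Int) := by
        simp
      have happ : pre ++ r :: rs' = (pre ++ [r]) ++ rs' := by simp
      rw [hget, hlen, happ]
      cases r with
      | true =>
        simp only [if_true]
        rw [ih rs' (pre ++ [true]) acc h]
        simp [pvSel]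
      | false =>
        simp only [Bool.false_eq_true, if_false]
        rw [ih rs' (pre ++ [false]) (acc ++ [g]) h]
        simp [pvSel]

lemma pvFinal_fold (gt : List Int) (rem : List Bool) (hlen : rem.length = gt.length) :
    (PySem.List.enumerate gt).foldl
      (fun acc p => if PySem.List.pyGetD rem p.1 false then acc else acc ++ [p.2]) [] =
      pvSel gt rem := by
  have h := pvFinal_aux gt rem [] [] hlen
  simpa using h

lemma pvMain_aux (gt : List Int) : ∀ (ds : List (Int × Int)) (tp fp : List Int)
    (rem : List Bool) (dict : PySem.Dict Int (List Int)),
    rem.length = gt.length → pvDictInv gt rem dict →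
    (ds.foldl (fun (st : List Int × List Int × List Int) p =>
        let r := pvLoopA p.2 [] st.2.2
        if r.1 then (st.1 ++ [p.1], st.2.1, r.2)
        else (st.1, st.2.1 ++ [p.1], st.2.2)) (tp, fp, pvSel gt rem))
      = ((ds.foldl (fun (st : List Int × List Int × PySem.Dict Int (List Int) × List Bool) p =>
          match pvBest st.2.2.1 p.2 with
          | none => (st.1, st.2.1 ++ [p.1], st.2.2.1, st.2.2.2)
          | some (k, v) =>
            (st.1 ++ [p.1], st.2.1,
             st.2.2.1.modify v [] (fun l => l.drop 1),
             PySem.List.pySetD st.2.2.2 k true)) (tp, fp, dict, rem)).1,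
         (ds.foldl (fun (st : List Int × List Int × PySem.Dict Int (List Int) × List Bool) p =>
          match pvBest st.2.2.1 p.2 with
          | none => (st.1, st.2.1 ++ [p.1], st.2.2.1, st.2.2.2)
          | some (k, v) =>
            (st.1 ++ [p.1], st.2.1,
             st.2.2.1.modify v [] (fun l => l.drop 1),
             PySem.List.pySetD st.2.2.2 k true)) (tp, fp, dict, rem)).2.1,
         pvSel gt ((ds.foldl (fun (st : List Int × List Int × PySem.Dict Int (List Int) × List Bool) p =>
          match pvBest st.2.2.1 p.2 with
          | none => (st.1, st.2.1 ++ [p.1], st.2.2.1, st.2.2.2)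
          | some (k, v) =>
            (st.1 ++ [p.1], st.2.1,
             st.2.2.1.modify v [] (fun l => l.drop 1),
             PySem.List.pySetD st.2.2.2 k true)) (tp, fp, dict, rem)).2.2.2))
      ∧ (ds.foldl (fun (st : List Int × List Int × PySem.Dict Int (List Int) × List Bool) p =>
          match pvBest st.2.2.1 p.2 with
          | none => (st.1, st.2.1 ++ [p.1], st.2.2.1, st.2.2.2)
          | some (k, v) =>
            (st.1 ++ [p.1], st.2.1,
             st.2.2.1.modify v [] (fun l => l.drop 1),
             PySem.List.pySetD st.2.2.2 k true)) (tp, fp, dict, rem)).2.2.2.length = gt.length := by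
  intro ds
  induction ds with
  | nil => intro tp fp rem dict hlen hd; exact ⟨rfl, hlen⟩
  | cons p t ih =>
    intro tp fp rem dict hlen hd
    obtain ⟨i, d⟩ := p
    simp only [List.foldl_cons]
    have hA := pvLoopA_sel d gt rem [] hlen
    have hB := pvBest_eq gt rem dict hd d
    cases hfh : pvFirstHit d gt rem with
    | none =>
      rw [hfh] at hA hB
      simp only [Option.map_none] at hB
      simp only [List.nil_append] at hA
      rw [hA, hB]
      dsimp only
      exact ih tp (fp ++ [i]) rem dict hlen hd
    | some q =>
      obtain ⟨j, g⟩ := q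
      rw [hfh] at hA hB
      simp only [Option.map_some, List.nil_append] at hA hB
      rw [hA, hB]
      dsimp only
      have hset : PySem.List.pySetD rem ((j : Nat) : Int) true = rem.set j true := by
        simp [PySem.List.pySetD_natCast]
      have hlen' : (rem.set j true).length = gt.length := by
        simpa [List.length_set] using hlen
      have hd' : pvDictInv gt (rem.set j true) (dict.modify g [] (fun l => l.drop 1)) := by
        intro v
        rw [PySem.Dict.getD_modify, pvPoss_set d gt rem j g hfh v]
        by_cases hv : v = g
        · subst hv
          rw [if_pos rfl, if_pos rfl, hd v]
          simp [List.drop_one, List.map_tail]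
        · rw [if_neg hv, if_neg hv, hd v]
      rw [hset]
      exact ih (tp ++ [i]) fp (rem.set j true) (dict.modify g [] (fun l => l.drop 1)) hlen' hd'

-- ===== VERDICT (by name: the statement is the Claim_ definition above) =====
theorem find_tpfpfn_spec : Claim_equal_find_tpfpfn := by
  intro ds gt _
  unfold Spec_find_tpfpfn
  show find_tpfpfn ds gt = find_tpfpfn_alt ds gt
  simp only [find_tpfpfn, find_tpfpfn_alt]
  have hmain := pvMain_aux gt (PySem.List.enumerate ds) [] []
    (List.replicate gt.length false) (pvBuild gt)
    (by simp) (pvBuild_inv gt)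
  rw [pvSel_replicate] at hmain
  obtain ⟨heq, hlen⟩ := hmain
  rw [heq, pvFinal_fold gt _ hlen]
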